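-- pv_equiv track=rewrite | github.com/italianreptar/PyWordle | solve_wordle.py | parse_knowns
-- ===== SOURCE A (Python) =====
-- from collections import defaultdict
--
-- def parse_knowns(knowns: str):
--     def rEL():
--         return list()
--
--     kd = defaultdict(rEL)
--     for ii, cc in enumerate(knowns):
--         if cc.isalpha():
--             jj = ii+1
--             cont_flag = jj < len(knowns)
--             while jj < len(knowns) and cont_flag:
--                 if knowns[jj].isnumeric():
--                     kd[cc].append(int(knowns[jj]))
--                 else:
--                     cont_flag = False
--                 jj += 1
--     return kd
-- ===== SOURCE B (Python) =====
-- from collections import defaultdict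
--
-- def parse_knowns(knowns: str):
--     kd = defaultdict(list)
--     current_letter = None
--     for cc in knowns:
--         if cc.isalpha():
--             current_letter = cc
--         elif cc.isnumeric() and current_letter is not None:
--             kd[current_letter].append(int(cc))
--         else:
--             current_letter = None
--     return kd
-- ===== Notes on version B (the rewrite author's own statement) =====
-- stated objective: simpler
-- what changed: Replaced the nested scan (for each letter an inner while over all following digits with a cont_flag) by a single flat pass keeping a current_letter state variable, so each character is visited once.
import Mathlib
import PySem

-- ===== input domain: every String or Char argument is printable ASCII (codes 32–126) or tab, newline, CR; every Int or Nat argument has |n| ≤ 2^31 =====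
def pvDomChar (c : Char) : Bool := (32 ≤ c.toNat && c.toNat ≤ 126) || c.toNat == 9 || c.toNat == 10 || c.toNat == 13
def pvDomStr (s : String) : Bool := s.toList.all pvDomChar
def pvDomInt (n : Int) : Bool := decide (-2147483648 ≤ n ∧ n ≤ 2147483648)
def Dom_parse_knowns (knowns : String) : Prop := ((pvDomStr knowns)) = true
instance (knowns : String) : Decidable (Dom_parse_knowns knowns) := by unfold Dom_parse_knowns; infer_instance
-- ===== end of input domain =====

-- B replaces A's nested scan (inner while with cont_flag per letter) by one flat pass with a
-- current-letter state variable; objective: simpler. ('isnumeric' is ported as Chars.isdigit,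
-- exact on the ASCII domain.)

-- ===== PORT A =====

-- kd[cc].append(int(ch)) on the defaultdict(list): first access creates the [] entry.
-- int(ch) is ported by PySem.Int.ofChars?; it is only evaluated under the isdigit guard,
-- where it is some, so the .getD 0 default is never used.
def pvPush (kd : PySem.Dict String (List Int)) (cc : Char) (ch : Char) :
    PySem.Dict String (List Int) :=
  kd.insert (String.ofList [cc]) (kd.getD (String.ofList [cc]) [] ++ [(PySem.Int.ofChars? [ch]).getD 0])

-- the inner 'while jj < len(knowns) and cont_flag' loop; knowns[jj] is in range under the guard
def pvAWhile (cs : List Char) (cc : Char) (jj : Nat) (cont : Bool)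
    (kd : PySem.Dict String (List Int)) : PySem.Dict String (List Int) :=
  if h : jj < cs.length ∧ cont = true then
    if PySem.Chars.isdigit cs[jj] then
      pvAWhile cs cc (jj + 1) cont (pvPush kd cc cs[jj])
    else
      pvAWhile cs cc (jj + 1) false kd
  else kd
termination_by cs.length - jj

def parse_knowns (knowns : String) : List (String × List Int) :=
  ((PySem.List.enumerate knowns.toList).foldl
    (fun kd p =>
      if PySem.Chars.isalpha p.2 then
        -- jj = ii+1 (ii ≥ 0, so it is the Nat index), cont_flag = jj < len(knowns)
        pvAWhile knowns.toList p.2 (p.1.toNat + 1) (decide (p.1.toNat + 1 < knowns.toList.length)) kd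
      else kd)
    PySem.Dict.empty).items

-- ===== PORT B =====

-- one pass: state = (dict so far, current_letter : Option Char)
def pvBStep (st : PySem.Dict String (List Int) × Option Char) (cc : Char) :
    PySem.Dict String (List Int) × Option Char :=
  if PySem.Chars.isalpha cc then (st.1, some cc)
  else if PySem.Chars.isdigit cc ∧ st.2.isSome then
    (st.1.insert (String.ofList [st.2.get!]) (st.1.getD (String.ofList [st.2.get!]) [] ++
      [(PySem.Int.ofChars? [cc]).getD 0]), st.2)
  else (st.1, none)

def parse_knowns_alt (knowns : String) : List (String × List Int) :=
  (knowns.toList.foldl pvBStep (PySem.Dict.empty, none)).1.items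

-- ===== PRECONDITION & SPEC =====
def Spec_parse_knowns (knowns : String) (out : List (String × List Int)) : Prop := out = parse_knowns_alt knowns
instance (knowns : String) (out : List (String × List Int)) : Decidable (Spec_parse_knowns knowns out) := by unfold Spec_parse_knowns; infer_instance

-- ===== CLAIM (what is proved, stated in full; the proofs are below) =====
def Claim_equal_parse_knowns : Prop := ∀ (knowns : String), Dom_parse_knowns knowns → Spec_parse_knowns knowns (parse_knowns knowns)

-- ===== LEMMAS AND PROOFS =====

-- spec form of the inner while: push the leading digit run of the suffix
def pvRun (kd : PySem.Dict String (List Int)) (cc : Char) : List Char → PySem.Dict String (List Int)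
  | [] => kd
  | c :: r => if PySem.Chars.isdigit c then pvRun (pvPush kd cc c) cc r else kd

-- spec form of A's outer loop, structural on the suffix
def pvAOut (kd : PySem.Dict String (List Int)) : List Char → PySem.Dict String (List Int)
  | [] => kd
  | c :: r => if PySem.Chars.isalpha c then pvAOut (pvRun kd c r) r else pvAOut kd r

theorem pvAWhile_eq_run (cs : List Char) (cc : Char) :
    ∀ jj kd, pvAWhile cs cc jj (decide (jj < cs.length)) kd = pvRun kd cc (cs.drop jj) := by
  intro jj
  induction hn : cs.length - jj using Nat.strong_induction_on generalizing jj with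
  | _ n ih =>
    intro kd
    rw [pvAWhile]
    by_cases hlt : jj < cs.length
    · have hdrop : cs.drop jj = cs[jj] :: cs.drop (jj + 1) := List.drop_eq_getElem_cons hlt
      simp only [hlt, decide_true, and_self, dif_pos, hdrop, pvRun]
      by_cases hd : PySem.Chars.isdigit cs[jj]
      · simp only [hd, if_pos]
        by_cases hlt2 : jj + 1 < cs.length
        · have := ih (cs.length - (jj + 1)) (by omega) (jj + 1) rfl (pvPush kd cc cs[jj])
          simpa [hlt2] using this
        · have hdrop2 : cs.drop (jj + 1) = [] := List.drop_eq_nil_of_le (by omega)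
          rw [pvAWhile]
          simp [hlt2, hdrop2, pvRun]
      · rw [if_neg hd, if_neg hd]
        rw [pvAWhile]
        simp
    · have hdrop : cs.drop jj = [] := List.drop_eq_nil_of_le (by omega)
      simp [hlt, hdrop, pvRun]

theorem pvA_foldl_eq_aout (cs : List Char) :
    ∀ (l : List Char) (k : Nat) kd, cs.drop k = l →
      (PySem.List.enumerate l (k : Int)).foldl
        (fun kd p =>
          if PySem.Chars.isalpha p.2 then
            pvAWhile cs p.2 (p.1.toNat + 1) (decide (p.1.toNat + 1 < cs.length)) kd
          else kd) kd
      = pvAOut kd l := by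
  intro l
  induction l with
  | nil => intro k kd _; simp [PySem.List.enumerate_nil, pvAOut]
  | cons c r ih =>
    intro k kd hdrop
    have hk : k < cs.length := by
      by_contra h
      rw [List.drop_eq_nil_of_le (by omega)] at hdrop
      exact List.cons_ne_nil _ _ hdrop.symm
    have hr : cs.drop (k + 1) = r := by
      have := List.drop_eq_getElem_cons hk (l := cs)
      rw [hdrop] at this
      exact (List.cons.injEq _ _ _ _ ▸ this).2.symm
    rw [PySem.List.enumerate_cons, List.foldl_cons]
    simp only [pvAOut]
    have htoNat : ((k : Int)).toNat = k := Int.toNat_natCast k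
    by_cases ha : PySem.Chars.isalpha c
    · simp only [ha, if_pos, htoNat]
      rw [pvAWhile_eq_run, hr]
      have := ih (k + 1) (pvRun kd c r) hr
      simpa using this
    · simp only [ha, Bool.false_eq_true]
      have := ih (k + 1) kd hr
      simpa using this

-- B's one-pass fold, as a plain function of the state
def pvBFold (st : PySem.Dict String (List Int) × Option Char) (l : List Char) :
    PySem.Dict String (List Int) × Option Char := l.foldl pvBStep st

-- main + auxiliary invariant, proved together by induction on the suffix:
-- with no current letter B's pass equals A's outer loop; with current letter k the
-- pending digit run of the suffix is pushed onto k, which A already did.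
theorem pvB_eq_aout (l : List Char) :
    (∀ kd, (pvBFold (kd, none) l).1 = pvAOut kd l) ∧
    (∀ kd k, (pvBFold (kd, some k) l).1 = pvAOut (pvRun kd k l) l) := by
  induction l with
  | nil => exact ⟨fun kd => rfl, fun kd k => rfl⟩
  | cons c r ih =>
    obtain ⟨ihm, iha⟩ := ih
    constructor
    · intro kd
      by_cases ha : PySem.Chars.isalpha c
      · simp only [pvBFold, List.foldl_cons, pvBStep, ha, if_pos, pvAOut]
        exact iha kd c
      · have hstep : pvBStep (kd, none) c = (kd, none) := by
          simp [pvBStep, ha]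
        simp only [pvBFold, List.foldl_cons, hstep, pvAOut, ha, Bool.false_eq_true]
        exact ihm kd
    · intro kd k
      by_cases ha : PySem.Chars.isalpha c
      · have hd : PySem.Chars.isdigit c = false := by
          simp only [PySem.Chars.isalpha, PySem.Chars.isupper, PySem.Chars.islower,
            Bool.or_eq_true, Bool.and_eq_true, decide_eq_true_eq, Char.le_def,
            UInt32.le_iff_toNat_le] at ha
          simp only [PySem.Chars.isdigit, Char.le_def, UInt32.le_iff_toNat_le,
            Bool.and_eq_false_iff, decide_eq_false_iff_not, not_le]
          have h0 : ('0' : Char).val.toNat = 48 := rfl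
          have h9 : ('9' : Char).val.toNat = 57 := rfl
          have hA : ('A' : Char).val.toNat = 65 := rfl
          have hZ : ('Z' : Char).val.toNat = 90 := rfl
          have hla : ('a' : Char).val.toNat = 97 := rfl
          have hlz : ('z' : Char).val.toNat = 122 := rfl
          omega
        simp only [pvBFold, List.foldl_cons, pvBStep, ha, if_pos, pvAOut, pvRun, hd,
          Bool.false_eq_true]
        exact iha kd c
      · by_cases hd : PySem.Chars.isdigit c
        · have hstep : pvBStep (kd, some k) c = (pvPush kd k c, some k) := by
            simp [pvBStep, ha, hd, pvPush]
          simp only [pvBFold, List.foldl_cons, hstep, pvAOut, ha, Bool.false_eq_true,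
            pvRun, hd, if_pos]
          exact iha (pvPush kd k c) k
        · have hstep : pvBStep (kd, some k) c = (kd, none) := by
            simp [pvBStep, ha, hd]
          simp only [pvBFold, List.foldl_cons, hstep, pvAOut, ha, hd, Bool.false_eq_true,
            pvRun]
          exact ihm kd

-- ===== VERDICT (by name: the statement is the Claim_ definition above) =====
theorem parse_knowns_spec : Claim_equal_parse_knowns := by
  intro knowns _
  unfold Spec_parse_knowns parse_knowns parse_knowns_alt
  congr 1
  have h := pvA_foldl_eq_aout knowns.toList knowns.toList 0 PySem.Dict.empty rfl
  simp only [Nat.cast_zero] at h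
  rw [h]
  exact ((pvB_eq_aout knowns.toList).1 PySem.Dict.empty).symm
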